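-- pv_equiv track=rewrite | github.com/ZVengin/Speaker-Identification-Benchmark-COLING2024 | utils.py | split_text_by_quotes
-- ===== SOURCE A (Python) =====
-- def split_text_by_quotes(text,quotes):
--     fragments = []
--     current_index = 0
--
--     for quote in quotes:
--         index = text.find(quote,current_index)
--         if index != -1:
--             if index != current_index:
--                 fragments.append({'type':'Narrative','text':text[current_index:index]})
--             fragments.append({'type':'Dialogue','text':quote})
--             current_index = index + len(quote)
--     if current_index < len(text):
--         fragments.append({'type':'Narrative','text':text[current_index:]})
--     return fragments
-- ===== SOURCE B (Python) =====
-- def split_text_by_quotes(text, quotes):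
--     # consume the text: cut off each matched quote together with the narrative
--     # gap before it, keeping (gap, quote) pairs; no index bookkeeping survives
--     gaps = []
--     hits = []
--     rest = text
--     for quote in quotes:
--         i = rest.find(quote)
--         if i != -1:
--             gaps.append(rest[:i])
--             hits.append(quote)
--             rest = rest[i + len(quote):]
--     fragments = []
--     for gap, quote in zip(gaps, hits):
--         if gap:
--             fragments.append({'type': 'Narrative', 'text': gap})
--         fragments.append({'type': 'Dialogue', 'text': quote})
--     if rest:
--         fragments.append({'type': 'Narrative', 'text': rest})
--     return fragments
-- ===== Notes on version B (the rewrite author's own statement) =====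
-- stated objective: alternative
-- what changed: B consumes the text as a shrinking suffix with plain find/slicing (no cursor index into the full string), collecting (gap, quote) pairs, then builds the fragment list in a second zip-interleaving pass; A keeps an integer cursor into the fixed text and emits fragments inline while searching.
import Mathlib
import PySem

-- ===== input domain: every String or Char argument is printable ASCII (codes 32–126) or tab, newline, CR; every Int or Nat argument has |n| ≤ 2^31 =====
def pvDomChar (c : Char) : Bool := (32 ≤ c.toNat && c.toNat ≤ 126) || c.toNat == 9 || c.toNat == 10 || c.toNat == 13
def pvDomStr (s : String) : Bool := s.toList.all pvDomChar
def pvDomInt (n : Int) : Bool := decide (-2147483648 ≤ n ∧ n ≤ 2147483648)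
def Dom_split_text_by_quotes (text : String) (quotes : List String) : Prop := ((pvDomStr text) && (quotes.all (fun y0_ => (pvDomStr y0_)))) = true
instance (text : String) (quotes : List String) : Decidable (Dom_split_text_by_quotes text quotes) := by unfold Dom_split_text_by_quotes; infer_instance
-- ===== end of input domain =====

-- B consumes the text as a shrinking suffix (no cursor into the full string), collecting
-- (gap, quote) pairs, then interleaves them by zip (objective: alternative decomposition).

-- ===== PORT A =====
-- A's single loop: state (fragments, current_index)
def pvAStep (text : String) (st : List (List (String × String)) × Int) (quote : String) :
    List (List (String × String)) × Int :=
  let index := PySem.Str.findFrom text quote st.2 none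
  if index ≠ -1 then
    let fragments :=
      if index ≠ st.2 then
        st.1 ++ [[("type", "Narrative"), ("text", PySem.Str.slice text (some st.2) (some index))]]
      else st.1
    (fragments ++ [[("type", "Dialogue"), ("text", quote)]], index + (quote.length : Int))
  else st

def split_text_by_quotes (text : String) (quotes : List String) : List (List (String × String)) :=
  let st := quotes.foldl (pvAStep text) ([], 0)
  if st.2 < (PySem.Str.len text : Int) then
    st.1 ++ [[("type", "Narrative"), ("text", PySem.Str.slice text (some st.2) none)]]
  else st.1

-- ===== PORT B =====
-- B's locating loop: state (gaps, hits, rest); 'rest' is the still-unconsumed suffix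
def pvBStep (st : List String × List String × String) (quote : String) :
    List String × List String × String :=
  let i := PySem.Str.find st.2.2 quote
  if i ≠ -1 then
    (st.1 ++ [PySem.Str.slice st.2.2 none (some i)], st.2.1 ++ [quote],
     PySem.Str.slice st.2.2 (some (i + (quote.length : Int))) none)
  else st

-- B's emission loop over one (gap, quote) pair
def pvBEmit (st : List (List (String × String))) (p : String × String) :
    List (List (String × String)) :=
  (if p.1 ≠ "" then st ++ [[("type", "Narrative"), ("text", p.1)]] else st) ++
    [[("type", "Dialogue"), ("text", p.2)]]

def split_text_by_quotes_alt (text : String) (quotes : List String) : List (List (String × String)) :=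
  let st := quotes.foldl pvBStep ([], [], text)
  let fragments := (st.1.zip st.2.1).foldl pvBEmit []
  if st.2.2 ≠ "" then
    fragments ++ [[("type", "Narrative"), ("text", st.2.2)]]
  else fragments

-- ===== PRECONDITION & SPEC =====
def Spec_split_text_by_quotes (text : String) (quotes : List String) (out : List (List (String × String))) : Prop := out = split_text_by_quotes_alt text quotes
instance (text : String) (quotes : List String) (out : List (List (String × String))) : Decidable (Spec_split_text_by_quotes text quotes out) := by unfold Spec_split_text_by_quotes; infer_instance

-- ===== CLAIM (what is proved, stated in full; the proofs are below) =====
def Claim_equal_split_text_by_quotes : Prop := ∀ (text : String) (quotes : List String), Dom_split_text_by_quotes text quotes → Spec_split_text_by_quotes text quotes (split_text_by_quotes text quotes)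

-- ===== LEMMAS AND PROOFS =====

-- common recursive descriptions over the unconsumed suffix cs
def pvPairs (cs : List Char) (qs : List String) : List (String × String) :=
  match qs with
  | [] => []
  | q :: rest =>
    let i := PySem.Chars.find cs q.toList
    if i = -1 then pvPairs cs rest
    else (String.ofList (cs.take i.toNat), q) :: pvPairs (cs.drop (i.toNat + q.length)) rest

def pvRest (cs : List Char) (qs : List String) : List Char :=
  match qs with
  | [] => cs
  | q :: rest =>
    let i := PySem.Chars.find cs q.toList
    if i = -1 then pvRest cs rest
    else pvRest (cs.drop (i.toNat + q.length)) rest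

def pvEat (cs : List Char) (qs : List String) : Nat :=
  match qs with
  | [] => 0
  | q :: rest =>
    let i := PySem.Chars.find cs q.toList
    if i = -1 then pvEat cs rest
    else (i.toNat + q.length) + pvEat (cs.drop (i.toNat + q.length)) rest

def pvFrags (cs : List Char) (qs : List String) : List (List (String × String)) :=
  match qs with
  | [] => []
  | q :: rest =>
    let i := PySem.Chars.find cs q.toList
    if i = -1 then pvFrags cs rest
    else
      (if i ≠ 0 then [[("type", "Narrative"), ("text", String.ofList (cs.take i.toNat))]] else []) ++
      [[("type", "Dialogue"), ("text", q)]] ++ pvFrags (cs.drop (i.toNat + q.length)) rest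

theorem pvFound_bounds {cs : List Char} {q : String}
    (h : PySem.Chars.find cs q.toList ≠ -1) :
    0 ≤ PySem.Chars.find cs q.toList ∧
    (PySem.Chars.find cs q.toList).toNat + q.length ≤ cs.length := by
  have h0 : 0 ≤ PySem.Chars.find cs q.toList := by
    rw [PySem.Chars.find_nonneg_iff]
    exact (PySem.Chars.find_ne_neg_one_iff _ _).mp h
  refine ⟨h0, ?_⟩
  have hsp := (PySem.Chars.find_spec (s := cs) (sub := q.toList) h0).1
  have hlen := hsp.length_le
  have hle := PySem.Chars.find_le_length (s := cs) (sub := q.toList)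
  simp [List.length_drop, String.length_toList] at hlen
  omega

theorem pvSliceStr (s : String) (a b : Option Int) :
    PySem.Str.slice s a b = String.ofList (PySem.List.slice s.toList a b) := by
  apply String.toList_injective
  simp [PySem.Str.toList_slice]


theorem pvRest_eq_drop (qs : List String) : ∀ cs, pvRest cs qs = cs.drop (pvEat cs qs) := by
  induction qs with
  | nil => intro cs; simp [pvRest, pvEat]
  | cons q rest ih =>
    intro cs
    simp only [pvRest, pvEat]
    by_cases h : PySem.Chars.find cs q.toList = -1
    · simp [h, ih]
    · simp [h, ih, List.drop_drop, Nat.add_comm]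

theorem pvEat_le (qs : List String) : ∀ cs, pvEat cs qs ≤ cs.length := by
  induction qs with
  | nil => intro cs; simp [pvEat]
  | cons q rest ih =>
    intro cs
    simp only [pvEat]
    by_cases h : PySem.Chars.find cs q.toList = -1
    · simp [h]; exact ih cs
    · have hb := pvFound_bounds h
      have := ih (cs.drop ((PySem.Chars.find cs q.toList).toNat + q.length))
      simp only [h, if_false, List.length_drop] at this ⊢
      omega

theorem pvA_fold (text : String) (qs : List String) :
    ∀ (frags : List (List (String × String))) (k : Nat), k ≤ text.toList.length →
      qs.foldl (pvAStep text) (frags, (k : Int)) =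
        (frags ++ pvFrags (text.toList.drop k) qs,
         ((k + pvEat (text.toList.drop k) qs : Nat) : Int)) := by
  induction qs with
  | nil => intro frags k hk; simp [pvFrags, pvEat]
  | cons q rest ih =>
    intro frags k hk
    simp only [List.foldl_cons, pvAStep]
    rw [PySem.Str.findFrom_eq, PySem.Chars.findFrom_natCast _ _ k hk]
    by_cases h : PySem.Chars.find (text.toList.drop k) q.toList = -1
    · rw [if_pos h, if_neg (by simp)]
      rw [ih frags k hk]
      simp [pvFrags, pvEat, h]
    · have hb := pvFound_bounds h
      set i := PySem.Chars.find (text.toList.drop k) q.toList with hi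
      have h0 : 0 ≤ i := hb.1
      have hne : ¬ (((k:Int) + i) = -1) := by omega
      rw [if_neg h, if_pos (show ((k:Int) + i) ≠ -1 from hne)]
      simp only [pvFrags, pvEat, ← hi, if_neg h]
      -- new cursor
      have hcur : (k:Int) + i + (q.length : Int) = ((k + i.toNat + q.length : Nat) : Int) := by
        push_cast; omega
      have hlt : text.toList.length = text.length := String.length_toList
      have hk2 : k + i.toNat + q.length ≤ text.toList.length := by
        have := hb.2
        simp [List.length_drop] at this
        omega
      have hdrop : text.toList.drop (k + i.toNat + q.length) =
          (text.toList.drop k).drop (i.toNat + q.length) := by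
        rw [List.drop_drop]; ring_nf
      -- narrative slice as ofList
      have hsl : PySem.Str.slice text (some (k:Int)) (some ((k:Int) + i)) =
          String.ofList ((text.toList.drop k).take i.toNat) := by
        rw [pvSliceStr]
        congr 1
        have : (k:Int) + i = ((k:Int) + ((i.toNat : Nat) : Int)) := by
          rw [Int.toNat_of_nonneg h0]
        rw [this, PySem.List.slice_natCast_add]
      by_cases hz : i = 0
      · have : ¬ ((k:Int) + i ≠ (k:Int)) := by omega
        rw [if_neg this]
        rw [if_neg (by omega : ¬ i ≠ 0)]
        rw [hcur]
        rw [ih _ _ hk2]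
        simp [hdrop]
        omega
      · rw [if_pos (by omega : ((k:Int) + i ≠ (k:Int)))]
        rw [if_pos (by omega : i ≠ 0)]
        rw [hcur, hsl]
        rw [ih _ _ hk2]
        simp [hdrop]
        omega

theorem pvB_fold (qs : List String) :
    ∀ (gaps hits : List String) (cs : List Char),
      qs.foldl pvBStep (gaps, hits, String.ofList cs) =
        (gaps ++ (pvPairs cs qs).map Prod.fst, hits ++ (pvPairs cs qs).map Prod.snd,
         String.ofList (pvRest cs qs)) := by
  induction qs with
  | nil => intro gaps hits cs; simp [pvPairs, pvRest]
  | cons q rest ih =>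
    intro gaps hits cs
    simp only [List.foldl_cons, pvBStep]
    have hfind : PySem.Str.find (String.ofList cs) q = PySem.Chars.find cs q.toList := by
      simp
    rw [hfind]
    by_cases h : PySem.Chars.find cs q.toList = -1
    · rw [if_neg (by simp [h])]
      rw [ih gaps hits cs]
      simp [pvPairs, pvRest, h]
    · have hb := pvFound_bounds h
      set i := PySem.Chars.find cs q.toList with hi
      have h0 : 0 ≤ i := hb.1
      rw [if_pos h]
      have hgap : PySem.Str.slice (String.ofList cs) none (some i) =
          String.ofList (cs.take i.toNat) := by
        rw [pvSliceStr]
        congr 1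
        simp [PySem.List.slice_to _ h0]
      have hrest : PySem.Str.slice (String.ofList cs) (some (i + (q.length : Int))) none =
          String.ofList (cs.drop (i.toNat + q.length)) := by
        rw [pvSliceStr]
        congr 1
        rw [PySem.List.slice_from _ (by omega : (0:Int) ≤ i + (q.length:Int))]
        simp
        congr 1
        omega
      rw [hgap, hrest, ih]
      simp [pvPairs, pvRest, ← hi, if_neg h]

theorem pvB_emit (qs : List String) :
    ∀ (cs : List Char) (acc : List (List (String × String))),
      (pvPairs cs qs).foldl pvBEmit acc = acc ++ pvFrags cs qs := by
  induction qs with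
  | nil => intro cs acc; simp [pvPairs, pvFrags]
  | cons q rest ih =>
    intro cs acc
    by_cases h : PySem.Chars.find cs q.toList = -1
    · simp only [pvPairs, pvFrags, h, if_pos rfl]
      exact ih cs acc
    · have hb := pvFound_bounds h
      set i := PySem.Chars.find cs q.toList with hi
      have h0 : 0 ≤ i := hb.1
      simp only [pvPairs, pvFrags, ← hi, if_neg h, List.foldl_cons]
      have hemp : (String.ofList (cs.take i.toNat) ≠ "") ↔ (i ≠ 0) := by
        constructor
        · intro hne hz
          apply hne
          rw [hz]
          simp
        · intro hne
          have : cs.take i.toNat ≠ [] := by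
            rw [ne_eq, List.take_eq_nil_iff]
            push_neg
            constructor
            · omega
            · intro hcs
              rw [hcs] at hb
              simp at hb
              omega
          intro hs
          apply this
          have := congrArg String.toList hs
          simpa using this
      rw [ih]
      simp only [pvBEmit]
      by_cases hz : i = 0
      · rw [if_neg (fun hc => (hemp.mp hc) hz), if_neg (by omega : ¬ i ≠ 0)]
        simp
      · rw [if_pos (hemp.mpr hz), if_pos (by omega : i ≠ 0)]
        simp

-- ===== VERDICT (by name: the statement is the Claim_ definition above) =====
theorem split_text_by_quotes_spec : Claim_equal_split_text_by_quotes := by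
  intro text quotes _
  unfold Spec_split_text_by_quotes split_text_by_quotes split_text_by_quotes_alt
  have hA := pvA_fold text quotes [] 0 (Nat.zero_le _)
  have hB := pvB_fold quotes [] [] text.toList
  simp only [Nat.cast_zero, List.drop_zero, Nat.zero_add, List.nil_append, String.ofList_toList] at hA hB
  rw [hA, hB]
  dsimp only
  rw [show ((pvPairs text.toList quotes).map Prod.fst).zip ((pvPairs text.toList quotes).map Prod.snd)
        = pvPairs text.toList quotes from Eq.symm (List.zip_of_prod rfl rfl)]
  rw [pvB_emit, List.nil_append]
  have hrd := pvRest_eq_drop quotes text.toList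
  have hle := pvEat_le quotes text.toList
  have hlen : text.toList.length = text.length := String.length_toList
  by_cases hlt : pvEat text.toList quotes < text.length
  · rw [if_pos (by simp [PySem.Str.len]; omega), if_pos (by
      rw [hrd]
      intro hs
      have := congrArg String.toList hs
      simp [List.drop_eq_nil_iff] at this
      omega)]
    congr 2
    rw [pvSliceStr, hrd]
    congr 1
    rw [PySem.List.slice_from _ (by omega : (0:Int) ≤ ((pvEat text.toList quotes : Nat) : Int))]
    simp
  · rw [if_neg (by simp [PySem.Str.len]; omega), if_neg (by
      rw [hrd]
      simp only [ne_eq, not_not]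
      apply String.toList_injective
      simp [List.drop_eq_nil_iff]
      omega)]
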